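-- pv_equiv track=rewrite | github.com/funstory-ai/aifw | libs/aifw-py/libner.py | find_stripped_index_at_or_after
-- ===== SOURCE A (Python) =====
-- from typing import Any, Dict, List, Optional, Tuple
--
-- def find_stripped_index_at_or_after(mapping: List[int], orig_index: int) -> int:
--     lo, hi = 0, len(mapping)
--     while lo < hi:
--         mid = (lo + hi) >> 1
--         if mapping[mid] < orig_index:
--             lo = mid + 1
--         else:
--             hi = mid
--     return lo
-- ===== SOURCE B (Python) =====
-- def find_stripped_index_at_or_after(mapping, orig_index):
--     def go(seg, base):
--         if not seg:
--             return base
--         m = len(seg) >> 1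
--         if seg[m] < orig_index:
--             return go(seg[m + 1:], base + m + 1)
--         return go(seg[:m], base)
--     return go(mapping, 0)
-- ===== Notes on version B (the rewrite author's own statement) =====
-- stated objective: alternative
-- what changed: A's in-place index binary search over a (lo, hi) pair is replaced by a divide-and-conquer recursion whose state is the remaining sublist (sliced at each step) plus a base offset; since len(seg)//2 relative to the segment equals (lo+hi)//2 absolutely, it probes exactly the same elements and returns the same insertion point on every input, sorted or not.
import Mathlib
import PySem

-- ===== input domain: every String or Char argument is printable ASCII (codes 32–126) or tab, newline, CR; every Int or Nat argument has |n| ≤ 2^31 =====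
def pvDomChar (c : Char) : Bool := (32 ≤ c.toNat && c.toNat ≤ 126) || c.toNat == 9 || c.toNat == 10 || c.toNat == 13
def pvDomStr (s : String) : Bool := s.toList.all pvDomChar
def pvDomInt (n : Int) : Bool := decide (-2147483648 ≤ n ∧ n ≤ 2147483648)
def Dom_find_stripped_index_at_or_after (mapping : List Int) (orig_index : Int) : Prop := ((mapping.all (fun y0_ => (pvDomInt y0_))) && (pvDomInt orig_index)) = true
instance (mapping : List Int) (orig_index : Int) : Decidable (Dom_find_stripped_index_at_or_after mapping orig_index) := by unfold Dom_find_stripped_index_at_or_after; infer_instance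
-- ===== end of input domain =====

-- B replaces the (lo, hi) index binary search by a divide-and-conquer recursion on the
-- remaining sublist (sliced each step) plus a base offset (objective: alternative; not faster).

-- ===== PORT A =====
-- while lo < hi: mid = (lo+hi) >> 1; … — lo, hi stay in [0, len], so Nat state is exact and
-- '>> 1' is Nat '/ 2'; mapping[mid] is always in range (lo ≤ mid < hi ≤ len), so the
-- '.getD 0' default of the total lookup is never used. The fuel argument is only a
-- termination guard: the loop runs at most len(mapping) iterations, so it never runs out.
def pvALoop (mapping : List Int) (orig_index : Int) : Nat → Nat → Nat → Nat
  | 0, lo, _ => lo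
  | fuel + 1, lo, hi =>
    if lo < hi then
      let mid := (lo + hi) / 2
      if mapping[mid]?.getD 0 < orig_index then
        pvALoop mapping orig_index fuel (mid + 1) hi
      else
        pvALoop mapping orig_index fuel lo mid
    else lo

def find_stripped_index_at_or_after (mapping : List Int) (orig_index : Int) : Int :=
  (pvALoop mapping orig_index mapping.length 0 mapping.length : Int)

-- ===== PORT B =====
-- go(seg, base): base on the empty segment, else split at m = len(seg) >> 1 and recurse on a
-- slice; Python's in-range slices seg[m+1:] / seg[:m] are List.drop (m+1) / List.take m, and
-- seg[m] (m < len(seg)) is the total lookup whose '.getD 0' default is never used. The fuel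
-- argument is only a termination guard: the segment shrinks each step, so it never runs out.
def pvBGo (orig_index : Int) : Nat → List Int → Nat → Nat
  | 0, _, base => base
  | fuel + 1, seg, base =>
    if seg = [] then base
    else
      let m := seg.length / 2
      if seg[m]?.getD 0 < orig_index then
        pvBGo orig_index fuel (seg.drop (m + 1)) (base + m + 1)
      else
        pvBGo orig_index fuel (seg.take m) base

def find_stripped_index_at_or_after_alt (mapping : List Int) (orig_index : Int) : Int :=
  (pvBGo orig_index mapping.length mapping 0 : Int)

-- ===== PRECONDITION & SPEC =====
def Spec_find_stripped_index_at_or_after (mapping : List Int) (orig_index : Int) (out : Int) : Prop := out = find_stripped_index_at_or_after_alt mapping orig_index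
instance (mapping : List Int) (orig_index : Int) (out : Int) : Decidable (Spec_find_stripped_index_at_or_after mapping orig_index out) := by unfold Spec_find_stripped_index_at_or_after; infer_instance

-- ===== CLAIM (what is proved, stated in full; the proofs are below) =====
def Claim_equal_find_stripped_index_at_or_after : Prop := ∀ (mapping : List Int) (orig_index : Int), Dom_find_stripped_index_at_or_after mapping orig_index → Spec_find_stripped_index_at_or_after mapping orig_index (find_stripped_index_at_or_after mapping orig_index)

-- ===== LEMMAS AND PROOFS =====

-- A's loop on [lo, hi) computes B's recursion on the segment mapping[lo:hi] with base lo
-- (same fuel on both sides), because lo + (hi-lo)/2 = (lo+hi)/2.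
theorem pvALoop_eq_pvBGo (mp : List Int) (oi : Int) :
    ∀ (fuel lo hi : Nat), hi - lo ≤ fuel → lo ≤ hi → hi ≤ mp.length →
      pvALoop mp oi fuel lo hi = pvBGo oi fuel ((mp.drop lo).take (hi - lo)) lo := by
  intro fuel
  induction fuel with
  | zero =>
    intro lo hi hf hle hlen
    have : hi = lo := by omega
    subst this
    rfl
  | succ fuel ih =>
    intro lo hi hf hle hlen
    by_cases h : lo < hi
    · have hseglen : ((mp.drop lo).take (hi - lo)).length = hi - lo := by
        simp [List.length_take, List.length_drop]; omega
      have hne : (mp.drop lo).take (hi - lo) ≠ [] := by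
        intro he
        rw [he] at hseglen
        simp at hseglen
        omega
      have hget : ((mp.drop lo).take (hi - lo))[(hi - lo) / 2]? = mp[(lo + hi) / 2]? := by
        rw [List.getElem?_take, if_pos (by omega)]
        rw [List.getElem?_drop]
        congr 1
        omega
      rw [pvALoop, if_pos h, pvBGo, if_neg hne]
      simp only [hseglen, hget]
      by_cases hc : mp[(lo + hi) / 2]?.getD 0 < oi
      · rw [if_pos hc, if_pos hc]
        rw [ih ((lo + hi) / 2 + 1) hi (by omega) (by omega) hlen]
        congr 1
        · rw [List.drop_take, List.drop_drop]
          congr 1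
          · omega
          · congr 1
            omega
        · omega
      · rw [if_neg hc, if_neg hc]
        rw [ih lo ((lo + hi) / 2) (by omega) (by omega) (by omega)]
        congr 1
        rw [List.take_take]
        congr 1
        omega
    · have : lo = hi := by omega
      subst this
      rw [pvALoop, if_neg (by omega), pvBGo]
      simp

-- ===== VERDICT (by name: the statement is the Claim_ definition above) =====
theorem find_stripped_index_at_or_after_spec : Claim_equal_find_stripped_index_at_or_after := by
  intro mapping orig_index _
  unfold Spec_find_stripped_index_at_or_after find_stripped_index_at_or_after find_stripped_index_at_or_after_alt
  rw [pvALoop_eq_pvBGo mapping orig_index mapping.length 0 mapping.length le_rfl (Nat.zero_le _) le_rfl]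
  simp
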